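-- pv_equiv track=rewrite | github.com/2ushar03/Chat-Bot_NLP | Desktop/RAG QnA/src/query.py | _truncate_contexts
-- ===== SOURCE A (Python) =====
-- def _truncate_contexts(contexts: list[str], max_chars: int) -> list[str]:
--     """Truncate combined contexts to approximately max_chars by
--     dropping the longest contexts until we fit. This keeps prompts below
--     the Llama model's context window (rough estimate using characters).
--     """
--     if not contexts:
--         return contexts
--     cur = contexts.copy()
--     while sum(len(c) for c in cur) > max_chars and len(cur) > 1:
--         cur.pop(max(range(len(cur)), key=lambda i: len(cur[i])))
--     if sum(len(c) for c in cur) > max_chars: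
--         last = cur[-1]
--         cur[-1] = last[: max_chars - sum(len(c) for c in cur[:-1])]
--     return cur
-- ===== SOURCE B (Python) =====
-- def _truncate_contexts(contexts: list[str], max_chars: int) -> list[str]:
--     if not contexts:
--         return contexts
--     n = len(contexts)
--     order = sorted(range(n), key=lambda i: (-len(contexts[i]), i))
--     total = sum(len(c) for c in contexts)
--     k = 0
--     while total > max_chars and n - k > 1:
--         total -= len(contexts[order[k]])
--         k += 1
--     dropped = set(order[:k])
--     cur = [c for i, c in enumerate(contexts) if i not in dropped]
--     if total > max_chars:
--         last = cur[-1]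
--         cur[-1] = last[: max_chars - (total - len(last))]
--     return cur
-- ===== Notes on version B (the rewrite author's own statement) =====
-- stated objective: faster
-- what changed: A rescans the whole list for the longest context and re-sums all lengths on every pop; B sorts the indices once by (-length, index) and walks that order with a running total, so each drop is O(1).
import Mathlib
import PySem

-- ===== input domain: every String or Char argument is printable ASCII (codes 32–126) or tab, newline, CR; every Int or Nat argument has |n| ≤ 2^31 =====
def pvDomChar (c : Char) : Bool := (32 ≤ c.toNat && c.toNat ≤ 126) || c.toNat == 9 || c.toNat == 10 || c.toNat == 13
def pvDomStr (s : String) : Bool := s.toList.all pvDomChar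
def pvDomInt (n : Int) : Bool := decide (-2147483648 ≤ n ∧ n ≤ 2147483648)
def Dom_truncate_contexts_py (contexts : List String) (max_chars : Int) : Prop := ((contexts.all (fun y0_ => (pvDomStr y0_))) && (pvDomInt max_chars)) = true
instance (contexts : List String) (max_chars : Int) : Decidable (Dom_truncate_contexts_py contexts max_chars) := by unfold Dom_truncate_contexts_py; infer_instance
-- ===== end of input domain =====

-- B replaces A's quadratic drop-the-longest loop (rescan + re-sum each pop) by one sort of the
-- indices by (-length, index) and a single greedy pass with a running total; same return value.

-- ===== PORT A =====
-- sum(len(c) for c in cur)  (the same generator-sum expression appears in both Pythons)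
def pvLenSum (l : List String) : Int := (l.map (fun c => PySem.Str.len c)).sum

-- A's while loop: pop the first-longest element while the total exceeds max_chars and len(cur) > 1
def pvLoopA (max_chars : Int) (cur : List String) : List String :=
  if pvLenSum cur > max_chars ∧ 1 < cur.length then
    -- max(range(len(cur)), key=lambda i: len(cur[i])); pyGetD is exact here: every i is in range
    match PySem.List.max? (PySem.List.pyRange 0 (PySem.List.len cur) 1)
        (fun i => PySem.Str.len (PySem.List.pyGetD cur i "")) with
    | none => cur          -- unreachable: the range of a nonempty list is nonempty
    | some idx =>
      match h : PySem.List.pop? cur idx with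
      | none => cur        -- unreachable: idx is a valid index
      | some r => pvLoopA max_chars r.2
  else cur
termination_by cur.length
decreasing_by
  have := PySem.List.length_of_pop?_eq_some (xs := cur) (i := idx) h
  omega

def truncate_contexts_py (contexts : List String) (max_chars : Int) : List String :=
  if contexts = [] then contexts
  else
    let cur := pvLoopA max_chars contexts
    if pvLenSum cur > max_chars then
      match PySem.List.pyGet? cur (-1) with
      | none => cur        -- unreachable: cur is nonempty
      | some last =>
        PySem.List.pySetD cur (-1)
          (PySem.Str.slice last none
            (some (max_chars - pvLenSum (PySem.List.slice cur none (some (-1))))))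
    else cur

-- ===== PORT B =====
-- B's while loop: walk the sorted index order with a running total and remaining count,
-- returning the dropped prefix and the final total
def pvGoB (contexts : List String) (max_chars : Int) : List Int → Int → Int → List Int × Int
  | ord, total, rem =>
    if total > max_chars ∧ 1 < rem then
      match ord with
      | [] => ([], total)  -- unreachable: rem > 1 means at least two indices remain
      | i :: rest =>
        let r := pvGoB contexts max_chars rest
          (total - PySem.Str.len (PySem.List.pyGetD contexts i "")) (rem - 1)
        (i :: r.1, r.2)
    else ([], total)

def truncate_contexts_py_alt (contexts : List String) (max_chars : Int) : List String :=
  if contexts = [] then contexts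
  else
    let n := PySem.List.len contexts
    -- sorted(range(n), key=lambda i: (-len(contexts[i]), i))
    let order := PySem.List.sorted2 (PySem.List.pyRange 0 n 1)
      (fun i => -(PySem.Str.len (PySem.List.pyGetD contexts i ""))) (fun i => i)
    let r := pvGoB contexts max_chars order (pvLenSum contexts) n
    let dropped : PySem.Set Int := PySem.Set.ofList r.1
    let cur := ((PySem.List.enumerate contexts 0).filter
      (fun p => !(PySem.Set.contains dropped p.1))).map (·.2)
    if r.2 > max_chars then
      match PySem.List.pyGet? cur (-1) with
      | none => cur        -- unreachable: cur is nonempty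
      | some last =>
        PySem.List.pySetD cur (-1)
          (PySem.Str.slice last none (some (max_chars - (r.2 - PySem.Str.len last))))
    else cur

-- ===== PRECONDITION & SPEC =====
def Spec_truncate_contexts_py (contexts : List String) (max_chars : Int) (out : List String) : Prop := out = truncate_contexts_py_alt contexts max_chars
instance (contexts : List String) (max_chars : Int) (out : List String) : Decidable (Spec_truncate_contexts_py contexts max_chars out) := by unfold Spec_truncate_contexts_py; infer_instance

-- ===== CLAIM (what is proved, stated in full; the proofs are below) =====
def Claim_equal_truncate_contexts_py : Prop := ∀ (contexts : List String) (max_chars : Int), Dom_truncate_contexts_py contexts max_chars → Spec_truncate_contexts_py contexts max_chars (truncate_contexts_py contexts max_chars)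

-- ===== LEMMAS AND PROOFS =====

-- proof-only abbreviations
def pvKp (contexts : List String) (ds : List Int) : List (Int × String) :=
  (PySem.List.enumerate contexts 0).filter (fun p => !ds.contains p.1)

def pvKept (contexts : List String) (ds : List Int) : List String :=
  (pvKp contexts ds).map (·.2)

-- the lexicographic sort key of index i
def pvKI (contexts : List String) (i : Int) : Lex (Int × Int) :=
  toLex (-(PySem.Str.len (PySem.List.pyGetD contexts i "")), i)

-- sorted2 is sorted with the lexicographic key (both are the same insertion sort)
lemma pv_sorted2_eq_sorted_toLex {α : Type} (xs : List α) (k1 k2 : α → Int) :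
    PySem.List.sorted2 xs k1 k2 false
      = PySem.List.sorted xs (fun x => toLex (k1 x, k2 x)) false := by
  simp only [PySem.List.sorted2, PySem.List.sorted, if_neg Bool.false_ne_true]
  have hb : (fun a b => (decide (k1 a < k1 b) || (!decide (k1 b < k1 a) && decide (k2 a < k2 b))))
      = (fun a b : α => decide (toLex (k1 a, k2 a) < toLex (k1 b, k2 b))) := by
    funext a b
    rcases lt_trichotomy (k1 a) (k1 b) with h | h | h
    · simp [Prod.Lex.toLex_lt_toLex, h]
    · simp [Prod.Lex.toLex_lt_toLex, h]
    · simp [Prod.Lex.toLex_lt_toLex, h, h.not_gt, h.ne']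
  rw [hb]

-- first-argmax characterisation of max? (foldl keeps the current element on ties)
lemma pv_max?_firstIdx {α κ : Type} [LinearOrder κ] (l : List α) (key : α → κ) (m : α)
    (h : PySem.List.max? l key = some m) :
    ∃ p : Nat, ∃ hp : p < l.length, l[p] = m ∧
      ∀ q, (hq : q < p) → key (l[q]'(by omega)) < key m := by
  have hstep : ∀ (a x : α) (t : List α),
      PySem.List.max? (a :: x :: t) key
        = PySem.List.max? ((if key a < key x then x else a) :: t) key := by
    intro a x t
    by_cases hx : key a < key x <;> simp [PySem.List.max?, hx]
  have aux : ∀ (t : List α) (a : α), ∃ b,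
      PySem.List.max? (a :: t) key = some b ∧
      ((b = a ∧ ∀ x ∈ t, key x ≤ key a) ∨
       (∃ p : Nat, ∃ hp : p < t.length, t[p] = b ∧ key a < key b ∧
         (∀ q, (hq : q < p) → key (t[q]'(by omega)) < key b) ∧
         (∀ q, (h1 : q < t.length) → key (t[q]'h1) ≤ key b))) := by
    intro t
    induction t with
    | nil => intro a; exact ⟨a, by simp [PySem.List.max?], Or.inl ⟨rfl, by simp⟩⟩
    | cons x t ih =>
      intro a
      by_cases hx : key a < key x
      · obtain ⟨b, hfold, hcase⟩ := ih x
        refine ⟨b, by rw [hstep, if_pos hx]; exact hfold, Or.inr ?_⟩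
        rcases hcase with ⟨rfl, hub⟩ | ⟨p, hp, hpb, hlt, hfirst, hub⟩
        · refine ⟨0, by simp, by simp, hx, ?_, ?_⟩
          · intro q hq
            exact absurd hq (Nat.not_lt_zero q)
          · intro q h1
            rcases q with _ | q
            · simp
            · simp only [List.getElem_cons_succ]
              exact hub _ (List.getElem_mem _)
        · refine ⟨p + 1, by simpa using Nat.succ_lt_succ hp, by simpa using hpb, lt_trans hx hlt, ?_, ?_⟩
          · intro q hq
            rcases q with _ | q
            · simpa using hlt
            · simpa using hfirst q (by omega)
          · intro q h1
            rcases q with _ | q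
            · simpa using le_of_lt hlt
            · simpa using hub q (by simpa using h1)
      · obtain ⟨b, hfold, hcase⟩ := ih a
        refine ⟨b, by rw [hstep, if_neg hx]; exact hfold, ?_⟩
        rcases hcase with ⟨rfl, hub⟩ | ⟨p, hp, hpb, hlt, hfirst, hub⟩
        · refine Or.inl ⟨rfl, ?_⟩
          intro y hy
          rcases List.mem_cons.mp hy with rfl | hy
          · exact not_lt.mp hx
          · exact hub y hy
        · refine Or.inr ⟨p + 1, by simpa using Nat.succ_lt_succ hp, by simpa using hpb, hlt, ?_, ?_⟩
          · intro q hq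
            rcases q with _ | q
            · simpa using lt_of_le_of_lt (not_lt.mp hx) hlt
            · simpa using hfirst q (by omega)
          · intro q h1
            rcases q with _ | q
            · simpa using le_of_lt (lt_of_le_of_lt (not_lt.mp hx) hlt)
            · simpa using hub q (by simpa using h1)
  rcases l with _ | ⟨x, t⟩
  · simp [PySem.List.max?] at h
  · obtain ⟨b, hfold, hcase⟩ := aux t x
    rw [h] at hfold
    obtain rfl : m = b := Option.some.inj hfold
    rcases hcase with ⟨rfl, hub⟩ | ⟨p, hp, hpb, hlt, hfirst, hub⟩
    · exact ⟨0, by simp, by simp, fun q hq => absurd hq (Nat.not_lt_zero q)⟩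
    · refine ⟨p + 1, by simpa using Nat.succ_lt_succ hp, by simpa using hpb, ?_⟩
      intro q hq
      rcases q with _ | q
      · simpa using hlt
      · simpa using hfirst q (by omega)

-- removing the i-th element splits the length-sum
lemma pv_lenSum_eraseIdx : ∀ (l : List String) (p : Nat), (hp : p < l.length) →
    pvLenSum l = PySem.Str.len (l[p]'hp) + pvLenSum (l.eraseIdx p) := by
  intro l
  induction l with
  | nil => intro p hp; simp at hp
  | cons x t ih =>
    intro p hp
    rcases p with _ | p
    · simp [pvLenSum]
    · have := ih p (by simpa using Nat.lt_of_succ_lt_succ hp)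
      simp only [pvLenSum, List.map_cons, List.sum_cons, List.eraseIdx_cons_succ,
        List.getElem_cons_succ] at *
      omega

-- erasing the unique pair with first component m is filtering it out
lemma pv_eraseIdx_eq_filter (kp : List (Int × String)) (m : Int) :
    ∀ (p0 : Nat), (hp0 : p0 < kp.length) →
    kp.Pairwise (fun p q => p.1 < q.1) → (kp[p0]'hp0).1 = m →
    kp.eraseIdx p0 = kp.filter (fun q => !(q.1 == m)) := by
  induction kp with
  | nil => intro p0 hp0; simp at hp0
  | cons x t ih =>
    intro p0 hp0 hpw hm
    have hpwc := List.pairwise_cons.mp hpw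
    rcases p0 with _ | p0
    · simp only [List.getElem_cons_zero] at hm
      have hall : ∀ q ∈ t, (!(q.1 == m)) = true := by
        intro q hq
        have := hpwc.1 q hq
        simp only [Bool.not_eq_eq_eq_not, Bool.not_true, beq_eq_false_iff_ne]
        omega
      simp [hm, List.filter_eq_self.mpr hall]
    · have hp0' : p0 < t.length := by simpa using Nat.lt_of_succ_lt_succ hp0
      simp only [List.getElem_cons_succ] at hm
      have hxm : x.1 ≠ m := by
        have := hpwc.1 (t[p0]'hp0') (List.getElem_mem _)
        omega
      have hx : (!(x.1 == m)) = true := by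
        simpa [Bool.not_eq_eq_eq_not, beq_eq_false_iff_ne] using hxm
      rw [List.eraseIdx_cons_succ, ih p0 hp0' hpwc.2 hm]
      simp [hx]

-- B's sort expression, as written in the port
def pvOrd (contexts : List String) : List Int :=
  PySem.List.sorted2 (PySem.List.pyRange 0 (PySem.List.len contexts) 1)
    (fun i => -(PySem.Str.len (PySem.List.pyGetD contexts i ""))) (fun i => i)

-- B's loop call with the invariant arguments
def pvG (contexts : List String) (mc : Int) (r ds : List Int) : List Int × Int :=
  pvGoB contexts mc r (pvLenSum (pvKept contexts ds))
    ((contexts.length : Int) - (ds.length : Int))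

lemma pv_kp_pairwise (contexts : List String) (ds : List Int) :
    (pvKp contexts ds).Pairwise (fun p q => p.1 < q.1) :=
  (PySem.List.pairwise_lt_enumerate contexts 0).filter _

lemma pv_kp_snoc (contexts : List String) (ds : List Int) (m : Int) :
    pvKp contexts (ds ++ [m]) = (pvKp contexts ds).filter (fun q => !(q.1 == m)) := by
  unfold pvKp
  rw [List.filter_filter]
  apply List.filter_congr
  intro p _
  by_cases h1 : p.1 ∈ ds <;> by_cases h2 : p.1 = m <;>
    simp [h1, h2]

lemma pv_kp_elem (contexts : List String) (ds : List Int) (p : Int × String)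
    (hp : p ∈ pvKp contexts ds) :
    ∃ k : Nat, ∃ hk : k < contexts.length,
      p.1 = (k : Int) ∧ p.2 = contexts[k] ∧ p.1 ∉ ds := by
  have hm := List.mem_filter.mp hp
  obtain ⟨k, hk, hpk⟩ := (PySem.List.mem_enumerate_iff contexts 0 p).mp hm.1
  refine ⟨k, hk, by simp [hpk], by simp [hpk], by simpa using hm.2⟩

-- the key of an index held by a kept pair, written through the pair
lemma pv_KI_lt_elim (contexts : List String) (a b : Int)
    (h : pvKI contexts a < pvKI contexts b) :
    PySem.Str.len (PySem.List.pyGetD contexts b "") < PySem.Str.len (PySem.List.pyGetD contexts a "")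
    ∨ (PySem.Str.len (PySem.List.pyGetD contexts b "") = PySem.Str.len (PySem.List.pyGetD contexts a "")
        ∧ a < b) := by
  rcases Prod.Lex.toLex_lt_toLex.mp h with h1 | ⟨h1, h2⟩
  · left; omega
  · right; omega

-- max with a key over a nonempty list always returns a value
lemma pv_max?_ne_none {α κ : Type} [LinearOrder κ] (x : α) (t : List α) (key : α → κ) :
    ∃ b, PySem.List.max? (x :: t) key = some b := by
  induction t generalizing x with
  | nil => exact ⟨x, by simp [PySem.List.max?]⟩
  | cons y t ih =>
    by_cases hx : key x < key y
    · obtain ⟨b, hb⟩ := ih y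
      exact ⟨b, by
        rw [show PySem.List.max? (x :: y :: t) key = PySem.List.max? (y :: t) key from by
          simp [PySem.List.max?, hx]]
        exact hb⟩
    · obtain ⟨b, hb⟩ := ih x
      exact ⟨b, by
        rw [show PySem.List.max? (x :: y :: t) key = PySem.List.max? (x :: t) key from by
          simp [PySem.List.max?, hx]]
        exact hb⟩

-- MAIN: A's loop, run on the contexts kept after dropping ds, lands exactly where B's greedy
-- walk over the rest of the sorted order says, with the running total and the counts in step.
lemma pv_main (contexts : List String) (mc : Int)
    (hpm : (pvOrd contexts).Perm (PySem.List.pyRange 0 (PySem.List.len contexts) 1))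
    (hpw : (pvOrd contexts).Pairwise (fun a b => pvKI contexts a < pvKI contexts b)) :
    ∀ (r ds : List Int),
      pvOrd contexts = ds ++ r →
      (pvKp contexts ds).length + ds.length = contexts.length →
      ds.length < contexts.length →
      pvLoopA mc (pvKept contexts ds)
          = pvKept contexts (ds ++ (pvG contexts mc r ds).1)
      ∧ (pvG contexts mc r ds).2
          = pvLenSum (pvKept contexts (ds ++ (pvG contexts mc r ds).1))
      ∧ (pvKp contexts (ds ++ (pvG contexts mc r ds).1)).length
            + (ds ++ (pvG contexts mc r ds).1).length = contexts.length
      ∧ (ds ++ (pvG contexts mc r ds).1).length < contexts.length := by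
  have hordlen : (pvOrd contexts).length = contexts.length := by
    rw [hpm.length_eq, PySem.List.len_eq, PySem.List.pyRange_zero_natCast]
    simp
  intro r
  induction r with
  | nil =>
    intro ds hsplit hlen hdslt
    exfalso
    have := congrArg List.length hsplit
    rw [hordlen] at this
    simp at this
    omega
  | cons m rest ih =>
    intro ds hsplit hlen hdslt
    have hkpl : (pvKept contexts ds).length = (pvKp contexts ds).length :=
      List.length_map ..
    have hremcast : (contexts.length : Int) - (ds.length : Int)
        = ((pvKept contexts ds).length : Int) := by
      rw [hkpl]; omega
    by_cases hG : pvLenSum (pvKept contexts ds) > mc ∧ 1 < (pvKept contexts ds).length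
    · -- both loops take a step, dropping index m
      -- ------- shared index facts -------
      have hnodup : (pvOrd contexts).Nodup := by
        refine hpm.nodup_iff.mpr ?_
        rw [PySem.List.len_eq, PySem.List.pyRange_zero_natCast]
        exact List.nodup_range.map (fun a b h => Int.natCast_inj.mp h)
      have hm_ord : m ∈ pvOrd contexts := by rw [hsplit]; simp
      have hm_range : m ∈ PySem.List.pyRange 0 (PySem.List.len contexts) 1 :=
        hpm.subset hm_ord
      have hm_bounds : 0 ≤ m ∧ m < (contexts.length : Int) := by
        have := PySem.List.mem_pyRange_one.mp hm_range
        rw [PySem.List.len_eq] at this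
        exact this
      have hmds : m ∉ ds := by
        rw [hsplit] at hnodup
        have := (List.nodup_append.mp hnodup).2.2
        intro hmem
        exact this m hmem m (List.mem_cons_self ..) rfl
      have hmlt : ∀ j ∈ rest, pvKI contexts m < pvKI contexts j := by
        rw [hsplit] at hpw
        exact (List.pairwise_cons.mp (List.pairwise_append.mp hpw).2.1).1
      have hpwkp : (pvKp contexts ds).Pairwise (fun p q => p.1 < q.1) :=
        pv_kp_pairwise contexts ds
      have hmlen : m.toNat < contexts.length := by omega
      have hmTn : m = ((m.toNat : Nat) : Int) := by omega
      have hm_kp : (m, contexts[m.toNat]) ∈ pvKp contexts ds := by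
        refine List.mem_filter.mpr ⟨?_, by simpa using hmds⟩
        exact (PySem.List.mem_enumerate_iff contexts 0 _).mpr
          ⟨m.toNat, hmlen, by rw [← hmTn]; simp⟩
      obtain ⟨p0, hp0, hp0eq⟩ := List.mem_iff_getElem.mp hm_kp
      have hgm : PySem.List.pyGetD contexts m "" = ((pvKp contexts ds)[p0]'hp0).2 := by
        have hnat : PySem.List.pyGetD contexts ((m.toNat : Nat) : Int) "" = contexts[m.toNat] := by
          rw [PySem.List.pyGetD_natCast]
          exact List.getD_eq_getElem _ _ hmlen
        rw [hp0eq]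
        show PySem.List.pyGetD contexts m "" = contexts[m.toNat]
        rw [← hnat, ← hmTn]
      -- every other kept pair is strictly lex-larger than m's pair
      have hkq : ∀ q, (hq : q < (pvKp contexts ds).length) → q ≠ p0 →
          (PySem.Str.len ((pvKp contexts ds)[q]'hq).2
              < PySem.Str.len (((pvKp contexts ds)[p0]'hp0).2)
           ∨ (PySem.Str.len ((pvKp contexts ds)[q]'hq).2
              = PySem.Str.len (((pvKp contexts ds)[p0]'hp0).2)
              ∧ m < ((pvKp contexts ds)[q]'hq).1)) := by
        intro q hq hqne
        obtain ⟨k, hk, hk1, hk2, hkds⟩ :=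
          pv_kp_elem contexts ds _ (List.getElem_mem hq)
        have hq_ne_m : ((pvKp contexts ds)[q]'hq).1 ≠ m := by
          rcases Nat.lt_or_ge q p0 with hlt | hge
          · have := List.pairwise_iff_getElem.mp hpwkp q p0 hq hp0 hlt
            rw [hp0eq] at this
            omega
          · have hgt : p0 < q := lt_of_le_of_ne hge (Ne.symm hqne)
            have := List.pairwise_iff_getElem.mp hpwkp p0 q hp0 hq hgt
            rw [hp0eq] at this
            omega
        have hq_rest : ((pvKp contexts ds)[q]'hq).1 ∈ rest := by
          have hq_ord : ((pvKp contexts ds)[q]'hq).1 ∈ pvOrd contexts := by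
            apply (hpm.mem_iff).mpr
            apply PySem.List.mem_pyRange_one.mpr
            rw [PySem.List.len_eq]
            omega
          rw [hsplit] at hq_ord
          rcases List.mem_append.mp hq_ord with hin | hin
          · exact absurd hin hkds
          · rcases List.mem_cons.mp hin with he | he
            · exact absurd he hq_ne_m
            · exact he
        have hlex := pv_KI_lt_elim contexts m _ (hmlt _ hq_rest)
        have hgq : PySem.List.pyGetD contexts ((pvKp contexts ds)[q]'hq).1 ""
            = ((pvKp contexts ds)[q]'hq).2 := by
          rw [hk1, hk2]
          simp [hk]
        rw [hgq, hgm] at hlex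
        exact hlex
      -- unfold A one step, turning the range into a mapped List.range
      rw [pvLoopA, if_pos hG, PySem.List.len_eq, PySem.List.pyRange_zero_natCast]
      have hkpl2 : (pvKept contexts ds).length = (pvKp contexts ds).length := by
        simp [pvKept]
      have hcur : ∀ q, (hq : q < (pvKept contexts ds).length) →
          (pvKept contexts ds)[q]'hq
            = ((pvKp contexts ds)[q]'(by omega)).2 := by
        intro q hq
        simp [pvKept]
      have hkey : ∀ q, (hq : q < (pvKept contexts ds).length) →
          PySem.Str.len (PySem.List.pyGetD (pvKept contexts ds) (q : Int) "")
            = PySem.Str.len ((pvKept contexts ds)[q]'hq) := by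
        intro q hq
        rw [PySem.List.pyGetD_natCast, List.getD_eq_getElem _ _ hq]
      split
      case h_1 _ hmx =>
        exfalso
        rcases hml : List.map (fun k : Nat => (k : Int))
            (List.range (pvKept contexts ds).length) with _ | ⟨x, t⟩
        · have : (pvKept contexts ds).length = 0 := by
            have := congrArg List.length hml
            simpa using this
          omega
        · rw [hml] at hmx
          obtain ⟨b, hb⟩ := pv_max?_ne_none x t (fun i => PySem.Str.len (PySem.List.pyGetD (pvKept contexts ds) i ""))
          rw [hb] at hmx
          exact Option.some_ne_none b hmx
      case h_2 idx hmx =>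
      obtain ⟨p, hplt, hpeq, hfirst⟩ := pv_max?_firstIdx _ _ _ hmx
      have hplt' : p < (pvKept contexts ds).length := by simpa using hplt
      have hidx : idx = (p : Int) := by
        rw [← hpeq]
        simp
      have hub : ∀ q, (hq : q < (pvKept contexts ds).length) →
          PySem.Str.len ((pvKept contexts ds)[q]'hq)
            ≤ PySem.Str.len ((pvKept contexts ds)[p]'hplt') := by
        intro q hq
        have hmem : (q : Int) ∈ List.map (fun k : Nat => (k : Int))
            (List.range (pvKept contexts ds).length) :=
          List.mem_map.mpr ⟨q, List.mem_range.mpr hq, rfl⟩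
        have h1 := PySem.List.max?_isMax hmx _ hmem
        rw [hidx] at h1
        rw [← hkey q hq, ← hkey p hplt']
        exact h1
      have hfirst' : ∀ q, (hq : q < p) →
          PySem.Str.len ((pvKept contexts ds)[q]'(by omega))
            < PySem.Str.len ((pvKept contexts ds)[p]'hplt') := by
        intro q hq
        have hq' : q < (pvKept contexts ds).length := by omega
        have h1 := hfirst q hq
        rw [hidx] at h1
        simp only [List.getElem_map, List.getElem_range] at h1
        rw [hkey q hq', hkey p hplt'] at h1
        exact h1
      -- A pops exactly the pair carrying index m
      have hp_eq_p0 : p = p0 := by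
        rcases Nat.lt_trichotomy p p0 with h | h | h
        · exfalso
          have hfst := List.pairwise_iff_getElem.mp hpwkp p p0 (by omega) hp0 h
          have hd := hkq p (by omega) (Nat.ne_of_lt h)
          have hlt : PySem.Str.len (((pvKp contexts ds)[p]'(by omega)).2)
              < PySem.Str.len (((pvKp contexts ds)[p0]'hp0).2) := by
            rw [hp0eq] at hfst
            rcases hd with hd | ⟨_, hd2⟩
            · exact hd
            · omega
          have hle := hub p0 (by omega)
          rw [hcur p0 (by omega), hcur p hplt'] at hle
          omega
        · exact h
        · exfalso
          have h1 := hfirst' p0 h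
          rw [hcur p0 (by omega), hcur p hplt'] at h1
          have hd := hkq p (by omega) (by omega)
          rcases hd with hd | ⟨hd1, _⟩ <;> omega
      subst hp_eq_p0
      -- pop reduces to eraseIdx at p
      have hpop : PySem.List.pop? (pvKept contexts ds) ((p : Nat) : Int)
          = some ((pvKept contexts ds)[p]'hplt', (pvKept contexts ds).eraseIdx p) :=
        PySem.List.pop?_natCast _ _ hplt'
      rw [hidx]
      split
      case h_1 _ hnone =>
        rw [hpop] at hnone
        exact absurd hnone (by simp)
      case h_2 rpair hsome =>
      rw [hpop] at hsome
      obtain rfl : rpair = ((pvKept contexts ds)[p]'hplt', (pvKept contexts ds).eraseIdx p) :=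
        (Option.some.inj hsome).symm
      have herase : (pvKept contexts ds).eraseIdx p = pvKept contexts (ds ++ [m]) := by
        unfold pvKept
        rw [List.eraseIdx_map,
          pv_eraseIdx_eq_filter (pvKp contexts ds) m p (by omega) hpwkp (by rw [hp0eq]),
          ← pv_kp_snoc]
      have hnewsum : pvLenSum (pvKept contexts (ds ++ [m]))
          = pvLenSum (pvKept contexts ds) - PySem.Str.len (PySem.List.pyGetD contexts m "") := by
        have hh := pv_lenSum_eraseIdx (pvKept contexts ds) p hplt'
        rw [herase, hcur p hplt', ← hgm] at hh
        omega
      have hlen' : (pvKp contexts (ds ++ [m])).length + (ds ++ [m]).length = contexts.length := by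
        have h1 : (pvKept contexts (ds ++ [m])).length = (pvKept contexts ds).length - 1 := by
          rw [← herase, List.length_eraseIdx]
          simp [hplt']
        have h2 : (pvKept contexts (ds ++ [m])).length = (pvKp contexts (ds ++ [m])).length := by
          simp [pvKept]
        simp only [List.length_append, List.length_cons, List.length_nil] at *
        omega
      have hdslt' : (ds ++ [m]).length < contexts.length := by
        simp only [List.length_append, List.length_cons, List.length_nil]
        omega
      obtain ⟨ihA, ihT, ihL, ihD⟩ := ih (ds ++ [m]) (by rw [hsplit]; simp) hlen' hdslt'
      -- B takes the same step
      have hGB : pvG contexts mc (m :: rest) ds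
          = ((m :: (pvG contexts mc rest (ds ++ [m])).1),
             (pvG contexts mc rest (ds ++ [m])).2) := by
        unfold pvG
        rw [pvGoB, if_pos (⟨hG.1, by rw [hremcast]; exact_mod_cast hG.2⟩ :
          pvLenSum (pvKept contexts ds) > mc ∧
            1 < (contexts.length : Int) - (ds.length : Int))]
        show (m :: (pvGoB contexts mc rest
            (pvLenSum (pvKept contexts ds) - PySem.Str.len (PySem.List.pyGetD contexts m ""))
            ((contexts.length : Int) - (ds.length : Int) - 1)).1,
          (pvGoB contexts mc rest
            (pvLenSum (pvKept contexts ds) - PySem.Str.len (PySem.List.pyGetD contexts m ""))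
            ((contexts.length : Int) - (ds.length : Int) - 1)).2) = _
        rw [← hnewsum]
        have harg2 : (contexts.length : Int) - (ds.length : Int) - 1
            = (contexts.length : Int) - ((ds ++ [m]).length : Int) := by
          simp only [List.length_append, List.length_cons, List.length_nil]
          push_cast
          ring
        rw [harg2]
      rw [hGB]
      have hassoc : ds ++ m :: (pvG contexts mc rest (ds ++ [m])).1
          = (ds ++ [m]) ++ (pvG contexts mc rest (ds ++ [m])).1 := by
        simp
      refine ⟨?_, ?_, ?_, ?_⟩
      · show pvLoopA mc ((pvKept contexts ds).eraseIdx p) = _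
        rw [herase, hassoc]
        exact ihA
      · show (pvG contexts mc rest (ds ++ [m])).2 = _
        rw [hassoc]
        exact ihT
      · rw [hassoc]
        exact ihL
      · rw [hassoc]
        exact ihD

    · -- both loops stop here
      have hgoB : pvG contexts mc (m :: rest) ds = ([], pvLenSum (pvKept contexts ds)) := by
        unfold pvG pvGoB
        rw [if_neg]
        rw [hremcast]
        intro hc
        exact hG ⟨hc.1, by exact_mod_cast hc.2⟩
      rw [hgoB]
      rw [pvLoopA, if_neg hG]
      simp [hlen, hdslt]

lemma pv_kept_nil (contexts : List String) : pvKept contexts [] = contexts := by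
  unfold pvKept pvKp
  simp [PySem.List.map_snd_enumerate]

lemma pv_KI_inj (contexts : List String) (a b : Int) (h : pvKI contexts a = pvKI contexts b) :
    a = b := by
  have := congrArg (fun x => (ofLex x).2) h
  simpa [pvKI] using this

-- the final truncation step, shared shape of both ports
lemma pv_final (curA curB : List String) (tB mc : Int)
    (hcur : curA = curB) (ht : tB = pvLenSum curA) (hne : curA ≠ []) :
    (if pvLenSum curA > mc then
      match PySem.List.pyGet? curA (-1) with
      | none => curA
      | some last =>
        PySem.List.pySetD curA (-1)
          (PySem.Str.slice last none
            (some (mc - pvLenSum (PySem.List.slice curA none (some (-1))))))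
     else curA)
    = (if tB > mc then
      match PySem.List.pyGet? curB (-1) with
      | none => curB
      | some last =>
        PySem.List.pySetD curB (-1)
          (PySem.Str.slice last none (some (mc - (tB - PySem.Str.len last))))
     else curB) := by
  subst hcur
  subst ht
  by_cases hc : pvLenSum curA > mc
  · rw [if_pos hc, if_pos hc]
    have hlast : PySem.List.pyGet? curA (-1) = some (curA.getLast hne) := by
      rw [PySem.List.pyGet?_neg_one]
      exact List.getLast?_eq_some_getLast ..
    rw [hlast]
    show PySem.List.pySetD curA (-1)
        (PySem.Str.slice (curA.getLast hne) none
          (some (mc - pvLenSum (PySem.List.slice curA none (some (-1))))))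
      = PySem.List.pySetD curA (-1)
        (PySem.Str.slice (curA.getLast hne) none
          (some (mc - (pvLenSum curA - PySem.Str.len (curA.getLast hne)))))
    have hsplit2 : pvLenSum curA
        = pvLenSum curA.dropLast + PySem.Str.len (curA.getLast hne) := by
      conv_lhs => rw [← List.dropLast_append_getLast hne]
      simp [pvLenSum]
    rw [PySem.List.slice_to_neg_one, hsplit2]
    have : pvLenSum curA.dropLast
        = pvLenSum curA.dropLast + PySem.Str.len (curA.getLast hne)
          - PySem.Str.len (curA.getLast hne) := by omega
    rw [← this]
  · rw [if_neg hc, if_neg hc]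

-- ===== VERDICT (by name: the statement is the Claim_ definition above) =====
theorem truncate_contexts_py_spec : Claim_equal_truncate_contexts_py := by
  intro contexts mc _hdom
  unfold Spec_truncate_contexts_py
  by_cases hnil : contexts = []
  · unfold truncate_contexts_py truncate_contexts_py_alt
    rw [if_pos hnil, if_pos hnil]
  · -- the sorted order: a permutation of the index range, strictly increasing in the lex key
    have hordeq : pvOrd contexts
        = PySem.List.sorted (PySem.List.pyRange 0 (PySem.List.len contexts) 1)
          (fun i => toLex (-(PySem.Str.len (PySem.List.pyGetD contexts i "")), i)) false :=
      pv_sorted2_eq_sorted_toLex _ _ _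
    have hpm : (pvOrd contexts).Perm (PySem.List.pyRange 0 (PySem.List.len contexts) 1) := by
      rw [hordeq]
      exact PySem.List.sorted_perm _ _ _
    have hnodupO : (pvOrd contexts).Nodup := by
      refine hpm.nodup_iff.mpr ?_
      rw [PySem.List.len_eq, PySem.List.pyRange_zero_natCast]
      exact List.nodup_range.map (fun a b h => Int.natCast_inj.mp h)
    have hle : (pvOrd contexts).Pairwise (fun a b => pvKI contexts a ≤ pvKI contexts b) := by
      rw [hordeq]
      exact PySem.List.sorted_pairwise _ _
    have hpw : (pvOrd contexts).Pairwise (fun a b => pvKI contexts a < pvKI contexts b) := by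
      refine (hle.and hnodupO).imp ?_
      rintro a b ⟨h1, h2⟩
      exact lt_of_le_of_ne h1 (fun hk => h2 (pv_KI_inj contexts a b hk))
    have hn0 : 0 < contexts.length := List.length_pos_of_ne_nil hnil
    have hkpn : (pvKp contexts []).length = contexts.length := by
      have h := congrArg List.length (pv_kept_nil contexts)
      simpa [pvKept] using h
    obtain ⟨mA, mT, mL, mD⟩ := pv_main contexts mc hpm hpw (pvOrd contexts) []
      (by simp) (by simpa using hkpn) (by simpa using hn0)
    have hgr : pvG contexts mc (pvOrd contexts) []
        = pvGoB contexts mc (pvOrd contexts) (pvLenSum contexts) (PySem.List.len contexts) := by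
      unfold pvG
      rw [pv_kept_nil, PySem.List.len_eq]
      norm_num
    rw [hgr] at mA mT mL mD
    simp only [List.nil_append] at mA mT mL mD
    rw [pv_kept_nil] at mA
    -- B's kept list, written with the Set, is pvKept
    have hcurB : ((PySem.List.enumerate contexts 0).filter
        (fun p => !(PySem.Set.contains (PySem.Set.ofList
          (pvGoB contexts mc (pvOrd contexts) (pvLenSum contexts) (PySem.List.len contexts)).1) p.1))).map (·.2)
        = pvKept contexts
            (pvGoB contexts mc (pvOrd contexts) (pvLenSum contexts) (PySem.List.len contexts)).1 := by
      unfold pvKept pvKp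
      congr 1
      apply List.filter_congr
      intro p _
      congr 1
      rw [PySem.Set.contains_eq_listContains, Bool.eq_iff_iff,
        List.contains_iff_mem, List.contains_iff_mem, PySem.Set.mem_ofList]
    have hAne : pvLoopA mc contexts ≠ [] := by
      rw [mA]
      have hlk : (pvKept contexts
          (pvGoB contexts mc (pvOrd contexts) (pvLenSum contexts) (PySem.List.len contexts)).1).length
          = (pvKp contexts
          (pvGoB contexts mc (pvOrd contexts) (pvLenSum contexts) (PySem.List.len contexts)).1).length := by
        simp [pvKept]
      intro hc
      have := congrArg List.length hc
      simp only [List.length_nil] at this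
      rw [hlk] at this
      omega
    have hOrd : PySem.List.sorted2 (PySem.List.pyRange 0 (PySem.List.len contexts) 1)
        (fun i => -(PySem.Str.len (PySem.List.pyGetD contexts i ""))) (fun i => i)
        = pvOrd contexts := rfl
    unfold truncate_contexts_py truncate_contexts_py_alt
    rw [if_neg hnil, if_neg hnil]
    refine pv_final (pvLoopA mc contexts) _ _ mc ?_ ?_ hAne
    · rw [hOrd, mA]
      exact hcurB.symm
    · rw [hOrd, mT, mA]
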